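-- pv_equiv track=rewrite | github.com/noob-dude27/binary-decimal_converter | decimal-to-binary.py | init_num_list
-- ===== SOURCE A (Python) =====
-- def init_num_list(limit: int) -> list:
--     """
--     Creates "num_list" not exceeding the given limit. "num_list" will be
--     used to add numbers within it."""
--     num_list = []
--
--     num = 1  # CONSTANT
--     # Adds original number before increment since it is part of the alignment.
--     starting_num = num
--     num_list.append(starting_num)
--
--     # Appends the summation of numbers to that are less than the given limit to "num_list".
--     while num < limit:
--         num += num
--
--         # Periodically checks the elements, prevents including a greater number
--         # than the limit from being added into the list.
--         if num > limit:
--             break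
--         else:
--             num_list.append(num)
--
--     # NOTE: Incorrect results will most likely happen if "num_list" is not in reverse!
--     num_list.reverse()
--     return num_list
-- ===== SOURCE B (Python) =====
-- def init_num_list(limit: int) -> list:
--     # Closed form: the result is the powers of two up to max(1, limit),
--     # already built in descending order.
--     n = max(1, limit).bit_length()
--     return [2 ** i for i in reversed(range(n))]
-- ===== Notes on version B (the rewrite author's own statement) =====
-- stated objective: simpler
-- what changed: Replaced the doubling while-loop plus a final reverse() by a closed form: the count of powers is max(1,limit).bit_length() and the list is built directly in descending order.
import Mathlib
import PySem

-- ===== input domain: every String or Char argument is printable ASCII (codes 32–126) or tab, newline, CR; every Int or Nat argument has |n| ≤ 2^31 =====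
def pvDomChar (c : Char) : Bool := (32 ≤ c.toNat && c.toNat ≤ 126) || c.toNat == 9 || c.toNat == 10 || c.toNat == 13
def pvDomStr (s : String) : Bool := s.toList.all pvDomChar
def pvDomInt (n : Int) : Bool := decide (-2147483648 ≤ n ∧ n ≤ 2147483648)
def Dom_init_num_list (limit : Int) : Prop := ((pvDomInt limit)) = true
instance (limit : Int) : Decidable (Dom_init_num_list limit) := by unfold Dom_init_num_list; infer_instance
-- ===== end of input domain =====

-- B replaces A's doubling while-loop and final reverse() by a closed form:
-- the number of powers is max(1,limit).bit_length(), and the list is built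
-- directly in descending order (objective: simpler).

-- ===== PORT A =====
-- the while loop of A: num doubles each step; appends unless the doubled value
-- exceeds limit (then break). 0 < num keeps the loop terminating.
def initNumLoop (limit num : Int) (acc : List Int) (h : 0 < num) : List Int :=
  if _hlt : num < limit then
    let num' := num + num
    if num' > limit then acc
    else initNumLoop limit num' (acc ++ [num']) (by omega)
  else acc
termination_by (limit - num).toNat
decreasing_by omega

def init_num_list (limit : Int) : List Int :=
  (initNumLoop limit 1 [1] (by norm_num)).reverse

-- ===== PORT B =====
def init_num_list_alt (limit : Int) : List Int :=
  let n := (max 1 limit).toNat.log2 + 1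
  (List.range n).reverse.map (fun i => (2 : Int) ^ i)

-- ===== PRECONDITION & SPEC =====
def Spec_init_num_list (limit : Int) (out : List Int) : Prop := out = init_num_list_alt limit
instance (limit : Int) (out : List Int) : Decidable (Spec_init_num_list limit out) := by unfold Spec_init_num_list; infer_instance

-- ===== CLAIM (what is proved, stated in full; the proofs are below) =====
def Claim_equal_init_num_list : Prop := ∀ (limit : Int), Dom_init_num_list limit → Spec_init_num_list limit (init_num_list limit)

-- ===== LEMMAS AND PROOFS =====

theorem range_succ_cons (m : ℕ) : List.range (m + 1) = 0 :: List.range' 1 m := by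
  rw [List.range_eq_range', List.range'_succ]

-- Characterization of A's loop: started at num = 2^j (a power of two ≤ max(1,limit)),
-- it appends exactly the powers 2^(j+1) … 2^(k-1), where k satisfies
-- 2^(k-1) ≤ max(1,limit) < 2^k (i.e. k = bit_length of max(1,limit)).
theorem initNumLoop_powers (limit : Int) (k : ℕ)
    (hk : (2 : Int) ^ (k - 1) ≤ max 1 limit) (hk2 : max 1 limit < 2 ^ k) (hk1 : 1 ≤ k) :
    ∀ (d j : ℕ) (num : Int) (hnum : 0 < num) (acc : List Int),
      k - 1 - j = d → num = 2 ^ j → (2 : Int) ^ j ≤ max 1 limit →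
      initNumLoop limit num acc hnum =
        acc ++ (List.range' (j + 1) (k - 1 - j)).map (fun i => (2 : Int) ^ i) := by
  intro d
  induction d with
  | zero =>
    intro j num hnum acc hd hj hle
    rw [initNumLoop]
    have hsum : num + num = (2 : Int) ^ (j + 1) := by rw [hj]; ring
    have hpow : (2 : Int) ^ k ≤ 2 ^ (j + 1) := pow_le_pow_right₀ (by norm_num) (by omega)
    have hlim : limit ≤ max 1 limit := le_max_right _ _
    by_cases h1 : num < limit
    · rw [dif_pos h1, if_pos (by linarith)]
      simp [hd]
    · rw [dif_neg h1]
      simp [hd]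
  | succ d ih =>
    intro j num hnum acc hd hj hle
    rw [initNumLoop]
    have hjk : j + 1 ≤ k - 1 := by omega
    have h2j : (2 : Int) ^ (j + 1) ≤ 2 ^ (k - 1) := pow_le_pow_right₀ (by norm_num) hjk
    have h3 : (2 : Int) ^ (j + 1) ≤ max 1 limit := le_trans h2j hk
    have hp : (0 : Int) < 2 ^ j := by positivity
    have hdouble : (2 : Int) ^ (j + 1) = 2 * 2 ^ j := by ring
    have hlimit : (2 : Int) ^ (j + 1) ≤ limit := by
      rcases max_cases (1 : Int) limit with ⟨heq, _⟩ | ⟨heq, _⟩ <;> omega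
    have hlt : num < limit := by omega
    have hsum : num + num = (2 : Int) ^ (j + 1) := by rw [hj]; ring
    rw [dif_pos hlt, if_neg (by omega)]
    have hrec := ih (j + 1) (num + num) (by omega) (acc ++ [num + num])
      (by omega) (by rw [hsum]) h3
    rw [hrec]
    have hrange : List.range' (j + 1) (k - 1 - j) = (j + 1) :: List.range' (j + 2) (k - 1 - (j + 1)) := by
      have he : k - 1 - j = (k - 1 - (j + 1)) + 1 := by omega
      rw [he, List.range'_succ]
    rw [hrange]
    simp [hsum]

theorem init_num_list_spec : Claim_equal_init_num_list := by
  intro limit _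
  unfold Spec_init_num_list init_num_list
  set L : Int := max 1 limit with hL
  have hL1 : 1 ≤ L := le_max_left _ _
  have hLN : L = (L.toNat : Int) := by omega
  have hne : L.toNat ≠ 0 := by omega
  set k : ℕ := L.toNat.log2 + 1 with hk
  have hlow : (2 : Int) ^ (k - 1) ≤ L := by
    have := Nat.log2_self_le hne
    rw [hLN]
    exact_mod_cast this
  have hhigh : L < 2 ^ k := by
    have := Nat.lt_log2_self (n := L.toNat)
    rw [hLN]
    exact_mod_cast this
  have hmain := initNumLoop_powers limit k hlow hhigh (by omega) (k - 1 - 0) 0 1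
    (by norm_num) [1] rfl (by norm_num) (by simp)
  have hrange := range_succ_cons (k - 1)
  have hk' : k - 1 + 1 = k := by omega
  rw [hk'] at hrange
  show (initNumLoop limit 1 [1] _).reverse = (List.range k).reverse.map (fun i => (2 : Int) ^ i)
  rw [hmain, hrange]
  simp
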